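-- pv_equiv track=rewrite | github.com/kixlab/clova_review_interface | server/dashboard/views.py | getLastAnnotations
-- ===== SOURCE A (Python) =====
-- def getLastAnnotations(jsonlist):
--     result=[]
--     result.append(jsonlist[0])
--     for idx in range(len(jsonlist)-1):
--         row=jsonlist[idx+1]
--         if(row["box_id"]==result[-1]["box_id"]):
--             result[-1]=row
--         else:
--             result.append(row)
--     return result
-- ===== SOURCE B (Python) =====
-- def getLastAnnotations(jsonlist):
--     # Stage 1: split the list into maximal runs of consecutive rows with equal box_id.
--     runs = []
--     cur = []
--     for row in jsonlist:
--         if cur and row["box_id"] != cur[-1]["box_id"]: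
--             runs.append(cur)
--             cur = []
--         cur.append(row)
--     runs.append(cur)
--     # Stage 2: keep the last row of each run.
--     # (On an empty input the single run is empty and run[-1] raises IndexError, like A.)
--     return [run[-1] for run in runs]
-- ===== Notes on version B (the rewrite author's own statement) =====
-- stated objective: alternative
-- what changed: A is a single forward pass that overwrites the last appended row when the box_id repeats; B is a two-stage group-then-reduce: it first splits the list into maximal runs of consecutive equal box_ids, then maps each run to its last element.
import Mathlib
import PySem

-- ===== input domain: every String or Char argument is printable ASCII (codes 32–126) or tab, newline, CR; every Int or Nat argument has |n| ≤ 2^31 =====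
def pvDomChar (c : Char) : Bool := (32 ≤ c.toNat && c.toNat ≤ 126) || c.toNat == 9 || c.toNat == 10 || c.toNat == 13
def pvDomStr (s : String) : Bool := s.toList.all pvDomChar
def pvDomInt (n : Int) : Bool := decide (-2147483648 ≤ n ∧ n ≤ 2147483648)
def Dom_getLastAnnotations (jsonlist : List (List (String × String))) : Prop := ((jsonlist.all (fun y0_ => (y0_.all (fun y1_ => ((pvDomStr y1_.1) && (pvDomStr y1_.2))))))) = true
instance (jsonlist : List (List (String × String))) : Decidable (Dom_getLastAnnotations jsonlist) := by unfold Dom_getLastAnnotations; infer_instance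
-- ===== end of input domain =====

-- B replaces A's overwrite-the-tail single pass with a two-stage group-then-reduce
-- (split into maximal runs of consecutive equal box_ids, then take each run's last row);
-- same cost, different decomposition. A and B only differ where A raises, excluded by Pre_.

-- ===== PORT A =====
-- first-match lookup row["box_id"] (dict as association list); shared dict primitive
def pvKey (row : List (String × String)) : Option String := (PySem.Dict.mk row).get? "box_id"

-- loop body of A; the Option threads Python's KeyError (none = raised)
def pvStepA (acc : Option (List (List (String × String)))) (row : List (String × String)) :
    Option (List (List (String × String))) :=
  match acc with
  | none => none
  | some result =>
    match result.getLast? with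
    | none => none    -- unreachable: result is never empty
    | some last =>
      match pvKey row, pvKey last with
      | some a, some b =>
          some (if a = b then result.dropLast ++ [row] else result ++ [row])
      | _, _ => none  -- KeyError

def getLastAnnotations (jsonlist : List (List (String × String))) : List (List (String × String)) :=
  match PySem.List.pyGet? jsonlist 0 with
  | none => []        -- IndexError on the empty list; excluded by Pre_
  | some first =>
    ((PySem.List.pyRange 0 ((jsonlist.length : Int) - 1) 1).foldl
        (fun acc idx => pvStepA acc (PySem.List.pyGetD jsonlist (idx + 1) []))
        (some [first])).getD []

-- ===== PORT B =====
-- Stage-1 loop body: state is (runs built so far, current run); none = KeyError raised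
def pvStep (st : Option (List (List (List (String × String))) × List (List (String × String))))
    (row : List (String × String)) :
    Option (List (List (List (String × String))) × List (List (String × String))) :=
  match st with
  | none => none
  | some (runs, cur) =>
    match cur.getLast? with
    | none => some (runs, cur ++ [row])            -- "if cur" is false: just append
    | some last =>
      match pvKey row, pvKey last with
      | some a, some b =>
          some (if a ≠ b then (runs ++ [cur], [row]) else (runs, cur ++ [row]))
      | _, _ => none  -- KeyError

def getLastAnnotations_alt (jsonlist : List (List (String × String))) :
    List (List (String × String)) :=
  match jsonlist.foldl pvStep (some ([], [])) with
  | none => []        -- KeyError; excluded by Pre_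
  | some (runs, cur) =>
      -- [run[-1] for run in runs]; a run is empty only on empty input (IndexError, excluded by Pre_)
      (runs ++ [cur]).filterMap (fun run => run.getLast?)

-- ===== PRECONDITION & SPEC =====
-- Pre_ excludes exactly the inputs where A raises: the empty list (IndexError) and
-- lists of length ≥ 2 containing a row without the key "box_id" (KeyError).
def Pre_getLastAnnotations (jsonlist : List (List (String × String))) : Prop :=
  jsonlist ≠ [] ∧
    (jsonlist.length = 1 ∨ ∀ row ∈ jsonlist, (pvKey row).isSome = true)
instance (jsonlist : List (List (String × String))) : Decidable (Pre_getLastAnnotations jsonlist) := by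
  unfold Pre_getLastAnnotations; infer_instance

def pvWitness_getLastAnnotations : (List (List (String × String))) :=
  [[("box_id", "1"), ("x", "a")], [("box_id", "1"), ("x", "b")], [("box_id", "2"), ("x", "c")]]

def Spec_getLastAnnotations (jsonlist : List (List (String × String))) (out : List (List (String × String))) : Prop := out = getLastAnnotations_alt jsonlist
instance (jsonlist : List (List (String × String))) (out : List (List (String × String))) : Decidable (Spec_getLastAnnotations jsonlist out) := by unfold Spec_getLastAnnotations; infer_instance

-- ===== CLAIM (what is proved, stated in full; the proofs are below) =====
def Claim_equal_getLastAnnotations : Prop := ∀ (jsonlist : List (List (String × String))), Dom_getLastAnnotations jsonlist → Pre_getLastAnnotations jsonlist → Spec_getLastAnnotations jsonlist (getLastAnnotations jsonlist)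

-- ===== LEMMAS AND PROOFS =====

-- the common mathematical value: last element of each maximal run of equal box_ids
def pvLastRuns (a : List (String × String)) : List (List (String × String)) → List (List (String × String))
  | [] => [a]
  | b :: t => if pvKey b = pvKey a then pvLastRuns b t else a :: pvLastRuns b t

theorem pvFoldA (xs : List (List (String × String))) :
    ∀ (a : List (String × String)) (r : List (List (String × String))),
    (pvKey a).isSome = true → (∀ x ∈ xs, (pvKey x).isSome = true) →
    xs.foldl pvStepA (some (r ++ [a])) = some (r ++ pvLastRuns a xs) := by
  induction xs with
  | nil => intro a r _ _; simp [pvLastRuns]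
  | cons b t ih =>
    intro a r ha hall
    obtain ⟨ka, hka⟩ := Option.isSome_iff_exists.mp ha
    obtain ⟨kb, hkb⟩ := Option.isSome_iff_exists.mp (hall b (by simp))
    have hstep : pvStepA (some (r ++ [a])) b =
        some (if kb = ka then r ++ [b] else (r ++ [a]) ++ [b]) := by
      simp only [pvStepA, List.getLast?_append, List.getLast?_singleton, Option.some_or,
        hkb, hka, List.dropLast_concat]
    rw [List.foldl_cons, hstep]
    by_cases h : kb = ka
    · rw [if_pos h]
      rw [ih b r (by simp [hkb]) (fun x hx => hall x (by simp [hx]))]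
      have : pvKey b = pvKey a := by simp [hka, hkb, h]
      simp [pvLastRuns, this]
    · rw [if_neg h]
      rw [ih b (r ++ [a]) (by simp [hkb]) (fun x hx => hall x (by simp [hx]))]
      have : ¬ pvKey b = pvKey a := by simp [hka, hkb, h]
      simp [pvLastRuns, this]

-- Stage-1 invariant for B: the current run is nonempty with last element a
theorem pvFoldRuns (xs : List (List (String × String))) :
    ∀ (a : List (String × String)) (pre : List (List (String × String)))
      (runs : List (List (List (String × String)))),
    (pvKey a).isSome = true → (∀ x ∈ xs, (pvKey x).isSome = true) →
    ∃ out, xs.foldl pvStep (some (runs, pre ++ [a])) = some out ∧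
      (out.1 ++ [out.2]).filterMap (fun run => run.getLast?)
        = runs.filterMap (fun run => run.getLast?) ++ pvLastRuns a xs := by
  induction xs with
  | nil =>
    intro a pre runs _ _
    exact ⟨(runs, pre ++ [a]), rfl, by simp [pvLastRuns]⟩
  | cons b t ih =>
    intro a pre runs ha hall
    obtain ⟨ka, hka⟩ := Option.isSome_iff_exists.mp ha
    obtain ⟨kb, hkb⟩ := Option.isSome_iff_exists.mp (hall b (by simp))
    have hstep : pvStep (some (runs, pre ++ [a])) b =
        some (if kb ≠ ka then (runs ++ [pre ++ [a]], [b]) else (runs, (pre ++ [a]) ++ [b])) := by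
      simp only [pvStep, List.getLast?_append, List.getLast?_singleton, Option.some_or,
        hkb, hka]
    rw [List.foldl_cons, hstep]
    by_cases h : kb = ka
    · rw [if_neg (by simp [h])]
      obtain ⟨out, hout, hval⟩ :=
        ih b (pre ++ [a]) runs (by simp [hkb]) (fun x hx => hall x (by simp [hx]))
      refine ⟨out, hout, ?_⟩
      have hk : pvKey b = pvKey a := by simp [hka, hkb, h]
      rw [hval]; simp [pvLastRuns, hk]
    · rw [if_pos (by simp [h])]
      obtain ⟨out, hout, hval⟩ :=
        ih b [] (runs ++ [pre ++ [a]]) (by simp [hkb]) (fun x hx => hall x (by simp [hx]))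
      refine ⟨out, by simpa using hout, ?_⟩
      have hk : ¬ pvKey b = pvKey a := by simp [hka, hkb, h]
      rw [hval]; simp [pvLastRuns, hk]

theorem pvFoldIdx {a b : Type} (d : a) (f : b → a → b) :
    ∀ (xs : List a) (init : b),
    (List.range xs.length).foldl (fun acc k => f acc (xs.getD k d)) init = xs.foldl f init := by
  intro xs
  induction xs with
  | nil => intro init; simp
  | cons y ys ih =>
    intro init
    rw [List.length_cons, List.range_succ_eq_map, List.foldl_cons, List.foldl_map]
    simp only [List.getD_cons_succ, List.getD_cons_zero]
    rw [ih (f init y), List.foldl_cons]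

theorem pvRangeFold (x0 : List (String × String)) (xs : List (List (String × String)))
    (f : Option (List (List (String × String))) → List (String × String) → Option (List (List (String × String))))
    (init : Option (List (List (String × String)))) :
    (PySem.List.pyRange 0 (((x0 :: xs).length : Int) - 1) 1).foldl
        (fun acc idx => f acc (PySem.List.pyGetD (x0 :: xs) (idx + 1) [])) init
      = xs.foldl f init := by
  have h1 : ((x0 :: xs).length : Int) - 1 = (xs.length : Int) := by simp
  rw [h1, PySem.List.pyRange_one, List.foldl_map]
  have h4 : (fun (acc : Option (List (List (String × String)))) (k : ℕ) =>
        f acc (PySem.List.pyGetD (x0 :: xs) (0 + (k : Int) + 1) []))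
      = (fun acc k => f acc (xs.getD k [])) := by
    funext acc k
    rw [show (0 + (k : Int) + 1) = (((k + 1 : ℕ)) : Int) by push_cast; ring,
      PySem.List.pyGetD_natCast, List.getD_cons_succ]
  have h5 : ((xs.length : Int) - 0).toNat = xs.length := by simp
  rw [h5, h4, pvFoldIdx]

-- ===== VERDICT (by name: the statement is the Claim_ definition above) =====
theorem getLastAnnotations_spec : Claim_equal_getLastAnnotations := by
  intro jsonlist _ hpre
  unfold Spec_getLastAnnotations
  obtain ⟨hne, hkeys⟩ := hpre
  match jsonlist, hne with
  | x0 :: xs, _ =>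
    rcases hkeys with h1 | hall
    · -- singleton: no key is ever read
      have hxs : xs = [] := by simpa using h1
      subst hxs
      simp [getLastAnnotations, getLastAnnotations_alt, pvStep,
        PySem.List.pyGet?, PySem.List.pyIdx?, PySem.List.pyRange_one_eq_nil]
    · have ha : (pvKey x0).isSome = true := hall x0 (by simp)
      have htl : ∀ x ∈ xs, (pvKey x).isSome = true := fun x hx => hall x (by simp [hx])
      have hA : getLastAnnotations (x0 :: xs) = pvLastRuns x0 xs := by
        unfold getLastAnnotations
        have hget : PySem.List.pyGet? (x0 :: xs) 0 = some x0 := by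
          simp [PySem.List.pyGet?, PySem.List.pyIdx?]
        simp only [hget]
        rw [pvRangeFold x0 xs pvStepA (some [x0])]
        have := pvFoldA xs x0 [] ha htl
        simp only [List.nil_append] at this
        rw [this]
        rfl
      have hB : getLastAnnotations_alt (x0 :: xs) = pvLastRuns x0 xs := by
        unfold getLastAnnotations_alt
        have hfirst : pvStep (some ([], [])) x0 = some ([], [x0]) := rfl
        rw [List.foldl_cons, hfirst]
        obtain ⟨out, hout, hval⟩ := pvFoldRuns xs x0 [] [] ha htl
        simp only [List.nil_append] at hout
        rw [hout]
        simpa using hval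
      rw [hA, hB]
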